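-- pv_equiv track=rewrite | github.com/Astroa7m/OCPC-training | helix.py | helix
-- ===== SOURCE A (Python) =====
-- def helix(arr1, arr2):
--     i = 0
--     j = 0
--     sum1 = 0
--     sum2 = 0
--     max_sum = 0
--
--     while i < len(arr1) and j < len(arr2):
--         intersectionFound = False
--         while not intersectionFound and i < len(arr1):
--             sum1 += arr1[i]
--             if arr1[i] in arr2:
--                 intersectionFound = True
--             i += 1
--
--         intersectionFound = False
--
--         while not intersectionFound and j < len(arr2):
--             sum2 += arr2[j]
--             if arr2[j] in arr1:
--                 intersectionFound = True
--             j += 1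
--
--         max_sum += max(sum1, sum2)
--         sum1 = 0
--         sum2 = 0
--
--     return max_sum
-- ===== SOURCE B (Python) =====
-- def helix(arr1, arr2):
--     def seg_sums(xs, other):
--         sums = []
--         acc = 0
--         pending = False
--         for x in xs:
--             acc += x
--             if x in other:
--                 sums.append(acc)
--                 acc = 0
--                 pending = False
--             else:
--                 pending = True
--         if pending:
--             sums.append(acc)
--         return sums
--     return sum(max(a, b) for a, b in zip(seg_sums(arr1, arr2), seg_sums(arr2, arr1)))
-- ===== Notes on version B (the rewrite author's own statement) =====
-- stated objective: simpler
-- what changed: Replaced the index-juggling nested while loops over both arrays at once by a clean decomposition: one pass per array building its list of segment sums (segments delimited inclusively by elements present in the other array, trailing partial segment kept), then sum(max(a,b) for a,b in zip(...)).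
import Mathlib
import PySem

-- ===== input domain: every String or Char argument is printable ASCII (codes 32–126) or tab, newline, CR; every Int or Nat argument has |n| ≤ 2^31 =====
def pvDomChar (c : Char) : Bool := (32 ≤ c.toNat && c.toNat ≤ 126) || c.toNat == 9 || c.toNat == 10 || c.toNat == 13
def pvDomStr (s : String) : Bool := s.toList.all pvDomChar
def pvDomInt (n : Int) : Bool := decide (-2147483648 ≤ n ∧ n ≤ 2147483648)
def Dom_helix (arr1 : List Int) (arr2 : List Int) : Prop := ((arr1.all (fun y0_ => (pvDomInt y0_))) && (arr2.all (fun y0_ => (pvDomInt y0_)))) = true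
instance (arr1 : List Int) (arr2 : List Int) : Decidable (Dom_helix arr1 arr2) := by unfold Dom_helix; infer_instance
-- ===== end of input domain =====

-- B replaces A's interleaved nested while loops by two independent segment-sum passes zipped together (objective: simpler).

-- ===== PORT A =====
-- inner while loop: 'while not intersectionFound and i < len(arr)': adds arr[i] to s,
-- stops after the first element that is a member of `other`; returns (new i, new sum).
-- fuel (= number of remaining indices) only makes the recursion structural; it is never
-- exhausted on the calls below
def helixInner (arr other : List Int) : Nat → Nat → Int → Nat × Int
  | 0, i, s => (i, s)
  | fuel + 1, i, s =>
      if h : i < arr.length then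
        let x := arr[i]
        if x ∈ other then (i + 1, s + x)
        else helixInner arr other fuel (i + 1) (s + x)
      else (i, s)

-- outer while loop: 'while i < len(arr1) and j < len(arr2)' (fuel as above)
def helixOuter (arr1 arr2 : List Int) : Nat → Nat → Nat → Int → Int
  | 0, _, _, maxSum => maxSum
  | fuel + 1, i, j, maxSum =>
      if i < arr1.length ∧ j < arr2.length then
        let r1 := helixInner arr1 arr2 (arr1.length - i) i 0
        let r2 := helixInner arr2 arr1 (arr2.length - j) j 0
        helixOuter arr1 arr2 fuel r1.1 r2.1 (maxSum + max r1.2 r2.2)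
      else maxSum

def helix (arr1 : List Int) (arr2 : List Int) : Int :=
  helixOuter arr1 arr2 arr1.length 0 0 0

-- ===== PORT B =====
-- seg_sums: one pass accumulating a running sum, pushed (and reset) at each element
-- that is a member of `other`; the trailing accumulator is pushed only if pending
def helixSegSums (xs other : List Int) : List Int :=
  let st := xs.foldl
    (fun (st : List Int × Int × Bool) x =>
      let acc := st.2.1 + x
      if x ∈ other then (st.1 ++ [acc], 0, false) else (st.1, acc, true))
    ([], 0, false)
  if st.2.2 then st.1 ++ [st.2.1] else st.1

def helix_alt (arr1 : List Int) (arr2 : List Int) : Int :=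
  ((helixSegSums arr1 arr2).zip (helixSegSums arr2 arr1)).foldl
    (fun a p => a + max p.1 p.2) 0

-- ===== PRECONDITION & SPEC =====
def Spec_helix (arr1 : List Int) (arr2 : List Int) (out : Int) : Prop := out = helix_alt arr1 arr2
instance (arr1 : List Int) (arr2 : List Int) (out : Int) : Decidable (Spec_helix arr1 arr2 out) := by unfold Spec_helix; infer_instance

-- ===== CLAIM (what is proved, stated in full; the proofs are below) =====
def Claim_equal_helix : Prop := ∀ (arr1 : List Int) (arr2 : List Int), Dom_helix arr1 arr2 → Spec_helix arr1 arr2 (helix arr1 arr2)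

-- ===== LEMMAS AND PROOFS =====

-- proof-side model: split off the first segment (sum, rest)
def splitSeg (other : List Int) : List Int → Int × List Int
  | [] => (0, [])
  | x :: xs =>
      if x ∈ other then (x, xs)
      else
        let r := splitSeg other xs
        (x + r.1, r.2)

theorem splitSeg_suffix (other : List Int) (l : List Int) :
    (splitSeg other l).2 <:+ l := by
  induction l with
  | nil => simp [splitSeg]
  | cons x xs ih =>
      simp only [splitSeg]
      split
      · exact (List.suffix_cons x xs)
      · exact ih.trans (List.suffix_cons x xs)

theorem splitSeg_len (other : List Int) (l : List Int) :
    (splitSeg other l).2.length ≤ l.length - 1 := by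
  induction l with
  | nil => simp [splitSeg]
  | cons x xs ih =>
      simp only [splitSeg]
      split
      · simp
      · simp only [List.length_cons]
        omega

-- proof-side model of seg_sums, recursively
def run (other : List Int) (acc : Int) (pending : Bool) : List Int → List Int
  | [] => if pending then [acc] else []
  | x :: xs => if x ∈ other then (acc + x) :: run other 0 false xs else run other (acc + x) true xs

theorem foldl_run (other : List Int) (l : List Int) :
    ∀ (out : List Int) (acc : Int) (pending : Bool),
      (let st := l.foldl
        (fun (st : List Int × Int × Bool) x =>
          let acc := st.2.1 + x
          if x ∈ other then (st.1 ++ [acc], 0, false) else (st.1, acc, true))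
        (out, acc, pending);
       if st.2.2 then st.1 ++ [st.2.1] else st.1) = out ++ run other acc pending l := by
  induction l with
  | nil => intro out acc pending; cases pending <;> simp [run]
  | cons x xs ih =>
      intro out acc pending
      simp only [List.foldl_cons, run]
      split
      · rw [ih]; simp
      · rw [ih]

theorem segSums_eq_run (xs other : List Int) :
    helixSegSums xs other = run other 0 false xs := by
  have := foldl_run other xs [] 0 false
  simpa [helixSegSums] using this

theorem run_cons (other : List Int) (l : List Int) (hl : l ≠ []) :
    ∀ (acc : Int) (p : Bool),
      run other acc p l = (acc + (splitSeg other l).1) :: run other 0 false (splitSeg other l).2 := by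
  induction l with
  | nil => exact absurd rfl hl
  | cons x xs ih =>
      intro acc p
      simp only [run, splitSeg]
      split
      · rfl
      · cases xs with
        | nil => simp [run, splitSeg]
        | cons y ys =>
            rw [ih (by simp)]
            simp only
            congr 1
            ring

-- the inner loop never looks at the fuel when i is already out of range
theorem inner_out (arr other : List Int) (fuel i : Nat) (s : Int) (h : ¬ i < arr.length) :
    helixInner arr other fuel i s = (i, s) := by
  cases fuel with
  | zero => rfl
  | succ fuel => rw [helixInner]; simp [h]

-- the inner loop computes the first segment of arr.drop i
theorem inner_eq_split (arr other : List Int) :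
    ∀ (fuel i : Nat) (s : Int), i < arr.length → arr.length - i ≤ fuel →
      helixInner arr other fuel i s =
        (arr.length - (splitSeg other (arr.drop i)).2.length, s + (splitSeg other (arr.drop i)).1) := by
  intro fuel
  induction fuel with
  | zero => intro i s hi hf; omega
  | succ fuel ih =>
      intro i s hi hf
      rw [helixInner]
      have hd : arr.drop i = arr[i] :: arr.drop (i + 1) :=
        List.drop_eq_getElem_cons hi
      by_cases hm : arr[i] ∈ other
      · simp only [hi, dif_pos, hm, if_pos, hd, splitSeg, Prod.mk.injEq]
        have : (arr.drop (i + 1)).length = arr.length - (i + 1) := by simp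
        first
        | (constructor <;> first | trivial | omega | ring)
        | trivial | omega | ring
      · simp only [hi, dif_pos, hm, if_false, ite_false]
        by_cases h2 : i + 1 < arr.length
        · have ih' : helixInner arr other fuel (i + 1) (s + arr[i]) =
              (arr.length - (splitSeg other (List.drop (i + 1) arr)).2.length,
                s + arr[i] + (splitSeg other (List.drop (i + 1) arr)).1) :=
            ih (i + 1) (s + arr[i]) h2 (by omega)
          rw [ih', hd]
          simp only [splitSeg, hm, if_false, ite_false, Prod.mk.injEq]
          first
          | (constructor <;> first | trivial | omega | ring)
          | trivial | omega | ring
        · have hnil : arr.drop (i + 1) = [] := by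
            apply List.drop_eq_nil_of_le; omega
          rw [inner_out arr other fuel (i + 1) (s + arr[i]) h2]
          rw [hd, hnil]
          simp only [splitSeg, hm, if_false, ite_false, List.length_nil, Prod.mk.injEq]
          first
          | (constructor <;> first | trivial | omega | ring)
          | trivial | omega | ring

-- proof-side zip-sum
def zsum : List Int → List Int → Int
  | a :: as, b :: bs => max a b + zsum as bs
  | _, _ => 0

theorem foldl_zsum (s1 s2 : List Int) :
    ∀ (acc : Int), (s1.zip s2).foldl (fun a p => a + max p.1 p.2) acc = acc + zsum s1 s2 := by
  induction s1 generalizing s2 with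
  | nil => intro acc; simp [zsum]
  | cons a as ih =>
      intro acc
      cases s2 with
      | nil => simp [zsum]
      | cons b bs =>
          simp only [List.zip_cons_cons, List.foldl_cons, zsum]
          rw [ih]
          ring

-- suffix ↔ drop
theorem suffix_drop_eq {l arr : List Int} (h : l <:+ arr) :
    arr.drop (arr.length - l.length) = l := by
  obtain ⟨t, ht⟩ := h
  subst ht
  simp

-- main loop invariant
theorem outer_eq (arr1 arr2 : List Int) :
    ∀ (fuel i j : Nat) (acc : Int), arr1.length - i ≤ fuel →
      helixOuter arr1 arr2 fuel i j acc =
        acc + zsum (run arr2 0 false (arr1.drop i)) (run arr1 0 false (arr2.drop j)) := by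
  intro fuel
  induction fuel with
  | zero =>
      intro i j acc h
      have hi : arr1.length ≤ i := by omega
      rw [helixOuter]
      rw [List.drop_eq_nil_of_le hi]
      simp [run, zsum]
  | succ fuel ih =>
      intro i j acc h
      rw [helixOuter]
      by_cases hc : i < arr1.length ∧ j < arr2.length
      · rw [if_pos hc]
        obtain ⟨h1, h2⟩ := hc
        rw [inner_eq_split arr1 arr2 (arr1.length - i) i 0 h1 (by omega),
            inner_eq_split arr2 arr1 (arr2.length - j) j 0 h2 (by omega)]
        simp only
        set r1 := splitSeg arr2 (arr1.drop i) with hr1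
        set r2 := splitSeg arr1 (arr2.drop j) with hr2
        have hs1 : r1.2 <:+ arr1 := (splitSeg_suffix _ _).trans (List.drop_suffix i arr1)
        have hs2 : r2.2 <:+ arr2 := (splitSeg_suffix _ _).trans (List.drop_suffix j arr2)
        have hl1 : r1.2.length ≤ (arr1.drop i).length - 1 := splitSeg_len _ _
        have hlen1 : (arr1.drop i).length = arr1.length - i := by simp
        rw [ih (arr1.length - r1.2.length) (arr2.length - r2.2.length) _ (by omega)]
        rw [suffix_drop_eq hs1, suffix_drop_eq hs2]
        have hne1 : arr1.drop i ≠ [] := by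
          intro hn; rw [List.drop_eq_nil_iff] at hn; omega
        have hne2 : arr2.drop j ≠ [] := by
          intro hn; rw [List.drop_eq_nil_iff] at hn; omega
        rw [run_cons arr2 (arr1.drop i) hne1 0 false, run_cons arr1 (arr2.drop j) hne2 0 false]
        simp only [zsum, zero_add, ← hr1, ← hr2]
        ring
      · rw [if_neg hc]
        rcases (by omega : arr1.length ≤ i ∨ arr2.length ≤ j) with hi | hj
        · rw [List.drop_eq_nil_of_le hi]; simp [run, zsum]
        · rw [show List.drop j arr2 = ([] : List Int) from List.drop_eq_nil_of_le hj]
          cases run arr2 0 false (arr1.drop i) <;> simp [run, zsum]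

-- ===== VERDICT (by name: the statement is the Claim_ definition above) =====
theorem helix_spec : Claim_equal_helix := by
  intro arr1 arr2 _
  unfold Spec_helix helix helix_alt
  rw [outer_eq arr1 arr2 arr1.length 0 0 0 (by omega)]
  rw [foldl_zsum, segSums_eq_run, segSums_eq_run]
  simp
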